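-- pv_equiv track=rewrite | github.com/nivi1412/dsa | Practice/graph24_.py | DFS
-- ===== SOURCE A (Python) =====
-- def DFS(richer,node,quiet,memo):
-- 	if node in memo:
-- 		return memo[node]
-- 	min_pair = (quiet[node], node)
-- 	for next_node in richer[node]:
-- 		child_min_pair=DFS(richer,next_node,quiet,memo)
-- 		if child_min_pair[0] < min_pair[0]:
-- 			min_pair = child_min_pair
-- 	memo[node]=min_pair
-- 	return memo[node]
-- ===== SOURCE B (Python) =====
-- def DFS(richer, node, quiet, memo):
--     # Iterative re-implementation: the recursion is defunctionalized into an
--     # explicit stack of (node, next-child-index, best-so-far) frames with a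
--     # return register, mutating memo exactly like the recursive version.
--     stack = [(node, 0, None)]
--     ret = None
--     while stack:
--         cur, i, best = stack.pop()
--         if best is None:
--             if cur in memo:
--                 ret = memo[cur]
--                 continue
--             best = (quiet[cur], cur)
--         elif ret[0] < best[0]:
--             best = ret
--         kids = richer[cur]
--         if i < len(kids):
--             stack.append((cur, i + 1, best))
--             stack.append((kids[i], 0, None))
--         else:
--             memo[cur] = best
--             ret = best
--     return ret
-- ===== Notes on version B (the rewrite author's own statement) =====
-- stated objective: alternative
-- what changed: The memoized recursion is defunctionalized into an iterative post-order traversal: an explicit stack of (node, next-child-index, best-so-far) frames with a return register replaces the call stack, finalizing each node's memo entry after its richer-children are resolved with the same left-to-right strict-less folding.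
import Mathlib
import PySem

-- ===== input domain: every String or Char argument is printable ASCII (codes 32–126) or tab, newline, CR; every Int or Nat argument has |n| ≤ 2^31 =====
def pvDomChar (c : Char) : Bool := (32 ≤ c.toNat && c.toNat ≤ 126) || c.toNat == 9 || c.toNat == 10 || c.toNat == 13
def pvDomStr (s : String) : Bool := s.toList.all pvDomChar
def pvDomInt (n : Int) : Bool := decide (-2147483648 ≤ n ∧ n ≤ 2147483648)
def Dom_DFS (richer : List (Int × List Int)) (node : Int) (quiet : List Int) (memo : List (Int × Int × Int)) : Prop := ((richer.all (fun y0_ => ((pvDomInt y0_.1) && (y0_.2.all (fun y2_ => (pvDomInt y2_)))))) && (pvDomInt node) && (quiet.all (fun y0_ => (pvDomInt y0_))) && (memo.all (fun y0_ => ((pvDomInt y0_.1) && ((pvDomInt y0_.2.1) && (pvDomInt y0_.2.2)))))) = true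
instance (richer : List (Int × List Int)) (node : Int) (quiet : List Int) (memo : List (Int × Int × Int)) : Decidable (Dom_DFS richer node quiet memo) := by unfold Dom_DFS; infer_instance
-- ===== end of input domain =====

-- B replaces A's memoized recursion by an explicit stack of (node, child-index, best-so-far)
-- frames with a return register (alternative decomposition, no recursion); both versions
-- mutate the Python memo dict identically, and the claim is about the return value.

-- ===== PORT A =====
-- A's Python dicts (richer, memo) are PySem.Dict wrappers of the given association lists;
-- the in-place mutation of memo is threaded through the recursion.  The Nat fuel argument only
-- makes the recursion total (Python A recurses without bound on cyclic inputs, which Pre_DFS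
-- excludes); on Pre_ inputs the fuel is never exhausted.
def dfsAKids (rec : Int → PySem.Dict Int (Int × Int) → Option ((Int × Int) × PySem.Dict Int (Int × Int))) :
    List Int → (Int × Int) → PySem.Dict Int (Int × Int) →
    Option ((Int × Int) × PySem.Dict Int (Int × Int))
  | [], best, memo => some (best, memo)
  | n :: rest, best, memo =>
    match rec n memo with
    | none => none
    | some (c, m) => dfsAKids rec rest (if c.1 < best.1 then c else best) m

def dfsA (richer : PySem.Dict Int (List Int)) (quiet : List Int) :
    Nat → Int → PySem.Dict Int (Int × Int) →
    Option ((Int × Int) × PySem.Dict Int (Int × Int))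
  | 0, _, _ => none
  | fuel + 1, node, memo =>
    match PySem.Dict.get? memo node with
    | some v => some (v, memo)                        -- if node in memo: return memo[node]
    | none =>
      match PySem.List.pyGet? quiet node with
      | none => none                                  -- IndexError (outside Pre_)
      | some q =>
        match PySem.Dict.get? richer node with
        | none => none                                -- KeyError (outside Pre_)
        | some kids =>
          match dfsAKids (dfsA richer quiet fuel) kids (q, node) memo with
          | none => none
          | some (best, m) => some (best, m.insert node best)   -- memo[node]=min_pair; return memo[node]

def DFS (richer : List (Int × List Int)) (node : Int) (quiet : List Int) (memo : List (Int × Int × Int)) : Int × Int :=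
  match dfsA (PySem.Dict.mk richer) quiet (richer.length + 2) node (PySem.Dict.mk memo) with
  | some (p, _) => p
  | none => (0, 0)

-- ===== PORT B =====
-- B's machine state: (stack of frames (cur, next child index, best-so-far), memo, return register).
-- A frame with best = none is a freshly pushed node (its memo check is still pending).
def stepCont (richer : PySem.Dict Int (List Int)) (cur : Int) (i : Nat) (best : Int × Int)
    (rest : List (Int × Nat × Option (Int × Int))) (m : PySem.Dict Int (Int × Int))
    (r : Option (Int × Int)) :
    List (Int × Nat × Option (Int × Int)) × PySem.Dict Int (Int × Int) × Option (Int × Int) :=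
  let kids := (PySem.Dict.get? richer cur).getD []    -- kids = richer[cur] (KeyError outside Pre_)
  if h : i < kids.length then
    ((kids[i], 0, none) :: (cur, i + 1, some best) :: rest, m, r)
  else
    (rest, m.insert cur best, some best)              -- memo[cur] = best; ret = best

def stepB (richer : PySem.Dict Int (List Int)) (quiet : List Int) :
    List (Int × Nat × Option (Int × Int)) × PySem.Dict Int (Int × Int) × Option (Int × Int) →
    List (Int × Nat × Option (Int × Int)) × PySem.Dict Int (Int × Int) × Option (Int × Int)
  | ([], m, r) => ([], m, r)
  | ((cur, i, bo) :: rest, m, r) =>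
    match bo with
    | none =>
      match PySem.Dict.get? m cur with
      | some v => (rest, m, some v)                   -- if cur in memo: ret = memo[cur]; continue
      | none => stepCont richer cur i ((PySem.List.pyGet? quiet cur).getD 0, cur) rest m r
    | some best =>
      stepCont richer cur i
        (match r with | some rv => if rv.1 < best.1 then rv else best | none => best) rest m r

-- the while loop; the Nat argument only makes it total (never exhausted on Pre_ inputs)
def runB (richer : PySem.Dict Int (List Int)) (quiet : List Int) :
    Nat → List (Int × Nat × Option (Int × Int)) × PySem.Dict Int (Int × Int) × Option (Int × Int) →
    List (Int × Nat × Option (Int × Int)) × PySem.Dict Int (Int × Int) × Option (Int × Int)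
  | 0, s => s
  | g + 1, s =>
    match s with
    | ([], _, _) => s                                 -- while stack: loop has ended
    | _ => runB richer quiet g (stepB richer quiet s)

def pvMaxKids (richer : List (Int × List Int)) : Nat :=
  richer.foldl (fun a p => max a p.2.length) 0

def DFS_alt (richer : List (Int × List Int)) (node : Int) (quiet : List Int) (memo : List (Int × Int × Int)) : Int × Int :=
  let s := runB (PySem.Dict.mk richer) quiet
      ((2 * pvMaxKids richer + 2) ^ (richer.length + 2))
      ([(node, 0, none)], PySem.Dict.mk memo, none)
  s.2.2.getD (0, 0)

-- ===== PRECONDITION & SPEC =====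
def pvMemoHas (memo : List (Int × Int × Int)) (k : Int) : Bool :=
  (PySem.Dict.get? (PySem.Dict.mk memo) k).isSome
def pvKids (richer : List (Int × List Int)) (k : Int) : List Int :=
  (PySem.Dict.get? (PySem.Dict.mk richer) k).getD []
def pvHasKey (richer : List (Int × List Int)) (k : Int) : Bool :=
  (PySem.Dict.get? (PySem.Dict.mk richer) k).isSome
def pvGrow (S : List Int) (l : List Int) : List Int :=
  l.foldl (fun acc n => if n ∈ acc then acc else acc ++ [n]) S
def pvReachStep (richer : List (Int × List Int)) (memo : List (Int × Int × Int)) (S : List Int) : List Int :=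
  pvGrow S ((S.filter (fun k => ! pvMemoHas memo k)).flatMap (pvKids richer))
-- nodes reachable from node along richer, stopping at memo keys (the nodes Python A visits)
def pvReach (richer : List (Int × List Int)) (memo : List (Int × Int × Int)) (node : Int) : List Int :=
  (pvReachStep richer memo)^[richer.length + 2] [node]
def pvRankStep (richer : List (Int × List Int)) (memo : List (Int × Int × Int)) (R : List (Int × Nat)) : List (Int × Nat) :=
  richer.map (fun p => (p.1,
    1 + ((p.2.filter (fun n => ! pvMemoHas memo n)).map
          (fun n => (((R.find? (fun e => e.1 == n)).map (·.2)).getD 0))).foldl max 0))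
def pvRankL (richer : List (Int × List Int)) (memo : List (Int × Int × Int)) : List (Int × Nat) :=
  (pvRankStep richer memo)^[richer.length + 1] (richer.map (fun p => (p.1, 0)))
-- iterated longest-path rank: a decidable certificate that the part of richer that A explores is acyclic
def pvRank (richer : List (Int × List Int)) (memo : List (Int × Int × Int)) (k : Int) : Nat :=
  (((pvRankL richer memo).find? (fun e => e.1 == k)).map (·.2)).getD 0
-- Pre_: node is already memoized, or every node A can reach (pvReach) that is not memoized is a
-- valid quiet index and a richer key whose non-memoized children stay in the reach set with a
-- strictly smaller rank (so the explored subgraph is acyclic and A's recursion returns normally).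
def pvPreB (richer : List (Int × List Int)) (node : Int) (quiet : List Int) (memo : List (Int × Int × Int)) : Bool :=
  pvMemoHas memo node ||
  ((pvReach richer memo node).all fun k =>
    pvMemoHas memo k ||
    (decide (PySem.Raise.InRange quiet.length k) && pvHasKey richer k &&
     ((pvKids richer k).all fun n =>
        pvMemoHas memo n ||
        ((pvReach richer memo node).contains n &&
         decide (pvRank richer memo n < pvRank richer memo k)))))
def Pre_DFS (richer : List (Int × List Int)) (node : Int) (quiet : List Int) (memo : List (Int × Int × Int)) : Prop :=
  pvPreB richer node quiet memo = true
instance (richer : List (Int × List Int)) (node : Int) (quiet : List Int) (memo : List (Int × Int × Int)) : Decidable (Pre_DFS richer node quiet memo) := by unfold Pre_DFS; infer_instance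
def pvWitness_DFS : (List (Int × List Int)) × Int × List Int × (List (Int × Int × Int)) :=
  ([(0, [1]), (1, [])], 0, [5, 3], [])
def Spec_DFS (richer : List (Int × List Int)) (node : Int) (quiet : List Int) (memo : List (Int × Int × Int)) (out : Int × Int) : Prop := out = DFS_alt richer node quiet memo
instance (richer : List (Int × List Int)) (node : Int) (quiet : List Int) (memo : List (Int × Int × Int)) (out : Int × Int) : Decidable (Spec_DFS richer node quiet memo out) := by unfold Spec_DFS; infer_instance

-- ===== CLAIM (what is proved, stated in full; the proofs are below) =====
def Claim_equal_DFS : Prop := ∀ (richer : List (Int × List Int)) (node : Int) (quiet : List Int) (memo : List (Int × Int × Int)), Dom_DFS richer node quiet memo → Pre_DFS richer node quiet memo → Spec_DFS richer node quiet memo (DFS richer node quiet memo)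


-- ===== LEMMAS AND PROOFS =====

-- dict lookup on a wrapped association list is the first matching entry
theorem pvGet?_mk_eq_find? {A : Type} (l : List (Int × A)) (k : Int) :
    PySem.Dict.get? (PySem.Dict.mk l) k = (l.find? (fun p => p.1 == k)).map (·.2) := by
  induction l with
  | nil => rfl
  | cons h t ih => rw [PySem.Dict.get?_mk_cons]; cases hc : (h.1 == k) <;> simp [List.find?, hc, ih]

theorem pvPyGet?_isSome_of_inRange (xs : List Int) (i : Int) (h : PySem.Raise.InRange xs.length i) :
    (PySem.List.pyGet? xs i).isSome = true := by
  cases hg : PySem.List.pyGet? xs i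
  · exact absurd h ((PySem.List.pyGet?_eq_none_iff _ _).mp hg)
  · rfl

-- the while loop: basic run lemmas
theorem runB_nil (RD : PySem.Dict Int (List Int)) (quiet : List Int) (g : Nat)
    (m : PySem.Dict Int (Int × Int)) (r : Option (Int × Int)) :
    runB RD quiet g ([], m, r) = ([], m, r) := by cases g <;> rfl

theorem runB_cons_succ (RD : PySem.Dict Int (List Int)) (quiet : List Int) (g : Nat)
    (fr : Int × Nat × Option (Int × Int)) (st : List (Int × Nat × Option (Int × Int)))
    (m : PySem.Dict Int (Int × Int)) (r : Option (Int × Int)) :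
    runB RD quiet (g + 1) (fr :: st, m, r) = runB RD quiet g (stepB RD quiet (fr :: st, m, r)) := rfl

theorem runB_add (RD : PySem.Dict Int (List Int)) (quiet : List Int) :
    ∀ (a b : Nat) s, runB RD quiet (a + b) s = runB RD quiet b (runB RD quiet a s) := by
  intro a
  induction a with
  | zero => intro b s; rw [Nat.zero_add]; rfl
  | succ a ih =>
    intro b s
    obtain ⟨st, m, r⟩ := s
    cases st with
    | nil => rw [runB_nil, runB_nil, runB_nil]
    | cons fr t =>
      rw [show a + 1 + b = (a + b) + 1 from by omega, runB_cons_succ, runB_cons_succ, ih]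

-- rank plumbing
theorem pvFind?_rankStep (richer : List (Int × List Int)) (memo : List (Int × Int × Int))
    (R : List (Int × Nat)) (k : Int) :
    (pvRankStep richer memo R).find? (fun e => e.1 == k) =
      (richer.find? (fun p => p.1 == k)).map (fun p => (p.1,
        1 + ((p.2.filter (fun n => ! pvMemoHas memo n)).map
              (fun n => (((R.find? (fun e => e.1 == n)).map (·.2)).getD 0))).foldl max 0)) := by
  unfold pvRankStep
  induction richer with
  | nil => rfl
  | cons p t ih =>
    rw [List.map_cons]
    cases hc : (p.1 == k)
    · rw [List.find?_cons_of_neg (by simpa using hc), List.find?_cons_of_neg (by simpa using hc)]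
      exact ih
    · rw [List.find?_cons_of_pos (by simpa using hc), List.find?_cons_of_pos (by simpa using hc)]
      rfl

theorem pvRank_pos (richer : List (Int × List Int)) (memo : List (Int × Int × Int)) (k : Int)
    (h : pvHasKey richer k = true) : 1 ≤ pvRank richer memo k := by
  unfold pvHasKey at h
  rw [pvGet?_mk_eq_find?] at h
  obtain ⟨p0, hp0⟩ : ∃ p0, richer.find? (fun p => p.1 == k) = some p0 := by
    cases hf : richer.find? (fun p => p.1 == k)
    · rw [hf] at h; simp at h
    · exact ⟨_, rfl⟩
  unfold pvRank pvRankL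
  rw [Function.iterate_succ_apply', pvFind?_rankStep, hp0]
  simp

theorem pvFoldl_max_le (m : Nat) : ∀ (l : List Nat) (a : Nat), a ≤ m → (∀ x ∈ l, x ≤ m) →
    l.foldl max a ≤ m := by
  intro l
  induction l with
  | nil => intro a h1 _; simpa using h1
  | cons x xs ih =>
    intro a h1 h2
    simp only [List.foldl_cons]
    exact ih _ (max_le h1 (h2 x (List.mem_cons_self ..))) (fun y hy => h2 y (List.mem_cons_of_mem _ hy))

theorem pvRankStep_bound (richer : List (Int × List Int)) (memo : List (Int × Int × Int))
    (R : List (Int × Nat)) (m : Nat) (h : ∀ e ∈ R, e.2 ≤ m) :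
    ∀ e ∈ pvRankStep richer memo R, e.2 ≤ m + 1 := by
  intro e he
  unfold pvRankStep at he
  obtain ⟨p, hp, rfl⟩ := List.mem_map.mp he
  simp only
  have : ((p.2.filter (fun n => ! pvMemoHas memo n)).map
      (fun n => (((R.find? (fun e => e.1 == n)).map (·.2)).getD 0))).foldl max 0 ≤ m := by
    apply pvFoldl_max_le m _ 0 (Nat.zero_le m)
    intro x hx
    obtain ⟨n, _, rfl⟩ := List.mem_map.mp hx
    cases hf : R.find? (fun e => e.1 == n) with
    | none => simp
    | some e0 => simpa using h e0 (List.mem_of_find?_eq_some hf)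
  omega

theorem pvRank_le (richer : List (Int × List Int)) (memo : List (Int × Int × Int)) (k : Int) :
    pvRank richer memo k ≤ richer.length + 1 := by
  have hiter : ∀ j, ∀ e ∈ (pvRankStep richer memo)^[j] (richer.map (fun p => (p.1, 0))), e.2 ≤ j := by
    intro j
    induction j with
    | zero =>
      intro e he
      simp only [Function.iterate_zero, id] at he
      obtain ⟨p, _, rfl⟩ := List.mem_map.mp he
      simp
    | succ j ihj =>
      rw [Function.iterate_succ_apply']
      exact pvRankStep_bound _ _ _ _ ihj
  unfold pvRank pvRankL
  cases hf : ((pvRankStep richer memo)^[richer.length + 1] (richer.map (fun p => (p.1, 0)))).find?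
      (fun e => e.1 == k) with
  | none => simp
  | some e =>
    have := hiter (richer.length + 1) e (List.mem_of_find?_eq_some hf)
    simp only [Option.map_some, Option.getD_some]
    omega

-- reach plumbing
theorem pvGrow_mem (x : Int) : ∀ (l S : List Int), x ∈ S → x ∈ pvGrow S l := by
  intro l
  induction l with
  | nil => intro S h; exact h
  | cons n t ih =>
    intro S h
    simp only [pvGrow, List.foldl_cons]
    exact ih _ (by split <;> simp [h])

theorem pvMem_reach (richer : List (Int × List Int)) (memo : List (Int × Int × Int)) (node : Int) :
    node ∈ pvReach richer memo node := by
  unfold pvReach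
  have key : ∀ j (S : List Int), node ∈ S → node ∈ (pvReachStep richer memo)^[j] S := by
    intro j
    induction j with
    | zero => intro S h; simpa using h
    | succ j ihj =>
      intro S h
      rw [Function.iterate_succ_apply]
      exact ihj _ (pvGrow_mem _ _ _ h)
  exact key _ _ (by simp)

-- max kid-list length
theorem pvFoldl_max_init : ∀ (l : List (Int × List Int)) (a : Nat),
    a ≤ l.foldl (fun a p => max a p.2.length) a := by
  intro l
  induction l with
  | nil => intro a; simp
  | cons p t ih =>
    intro a
    simp only [List.foldl_cons]
    exact le_trans (le_max_left _ _) (ih _)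

theorem pvMem_le_foldl_max : ∀ (l : List (Int × List Int)) (a : Nat) (p : Int × List Int),
    p ∈ l → p.2.length ≤ l.foldl (fun a p => max a p.2.length) a := by
  intro l
  induction l with
  | nil => intro a p h; cases h
  | cons q t ih =>
    intro a p h
    simp only [List.foldl_cons]
    rcases List.mem_cons.mp h with rfl | h
    · exact le_trans (le_max_right _ _) (pvFoldl_max_init t _)
    · exact ih _ _ h

theorem pvKids_le_max (richer : List (Int × List Int)) (k : Int) (ns : List Int)
    (h : PySem.Dict.get? (PySem.Dict.mk richer) k = some ns) : ns.length ≤ pvMaxKids richer := by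
  rw [pvGet?_mk_eq_find?] at h
  cases hf : richer.find? (fun p => p.1 == k) with
  | none => rw [hf] at h; cases h
  | some p =>
    rw [hf] at h
    simp only [Option.map_some, Option.some.injEq] at h
    have hm := List.mem_of_find?_eq_some hf
    rw [← h]
    exact pvMem_le_foldl_max _ _ _ hm

-- A's recursion returns normally on Pre_ inputs (with the memo-monotonicity invariant)
theorem pvMain (RD : PySem.Dict Int (List Int)) (quiet : List Int) (S : List Int)
    (rank : Int → Nat) (memo0 : PySem.Dict Int (Int × Int))
    (HS : ∀ k, k ∈ S → PySem.Dict.get? memo0 k = none →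
      (PySem.List.pyGet? quiet k).isSome = true ∧
      ∃ ns, PySem.Dict.get? RD k = some ns ∧ 1 ≤ rank k ∧
        ∀ n ∈ ns, (PySem.Dict.get? memo0 n).isSome = true ∨ (n ∈ S ∧ rank n < rank k)) :
    ∀ (f : Nat) (node : Int) (memo' : PySem.Dict Int (Int × Int)),
      (∀ k v, PySem.Dict.get? memo0 k = some v → PySem.Dict.get? memo' k = some v) →
      (((PySem.Dict.get? memo' node).isSome = true ∧ 1 ≤ f) ∨ (node ∈ S ∧ rank node < f)) →
      ∃ p m'', dfsA RD quiet f node memo' = some (p, m'') ∧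
        (∀ k v, PySem.Dict.get? memo' k = some v → PySem.Dict.get? m'' k = some v) := by
  intro f
  induction f with
  | zero => intro node memo' _ hcase; rcases hcase with ⟨_, h⟩ | ⟨_, h⟩ <;> omega
  | succ f ih =>
    intro node memo' hsub hcase
    cases hm : PySem.Dict.get? memo' node with
    | some v => exact ⟨v, memo', by simp [dfsA, hm], fun _ _ h => h⟩
    | none =>
      have hns : node ∈ S ∧ rank node < f + 1 := by
        rcases hcase with ⟨h1, _⟩ | h2
        · rw [hm] at h1; simp at h1
        · exact h2
      have h0 : PySem.Dict.get? memo0 node = none := by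
        cases h : PySem.Dict.get? memo0 node with
        | none => rfl
        | some w => rw [hsub _ _ h] at hm; cases hm
      obtain ⟨hqs, ns, hget, hrk1, hkids⟩ := HS node hns.1 h0
      obtain ⟨q, hq⟩ : ∃ q, PySem.List.pyGet? quiet node = some q := by
        cases h : PySem.List.pyGet? quiet node
        · rw [h] at hqs; simp at hqs
        · exact ⟨_, rfl⟩
      have hf1 : 1 ≤ f := by omega
      have KL : ∀ (ks : List Int) (best : Int × Int) (memo₁ : PySem.Dict Int (Int × Int)),
          (∀ k v, PySem.Dict.get? memo0 k = some v → PySem.Dict.get? memo₁ k = some v) →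
          (∀ n ∈ ks, (PySem.Dict.get? memo0 n).isSome = true ∨ (n ∈ S ∧ rank n < f)) →
          ∃ b2 m2, dfsAKids (dfsA RD quiet f) ks best memo₁ = some (b2, m2) ∧
            (∀ k v, PySem.Dict.get? memo₁ k = some v → PySem.Dict.get? m2 k = some v) := by
        intro ks
        induction ks with
        | nil => intro best memo₁ _ _; exact ⟨best, memo₁, rfl, fun _ _ h => h⟩
        | cons n rest ihk =>
          intro best memo₁ hs hn
          have hcn : ((PySem.Dict.get? memo₁ n).isSome = true ∧ 1 ≤ f) ∨ (n ∈ S ∧ rank n < f) := by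
            rcases hn n (List.mem_cons_self ..) with h | h
            · left
              refine ⟨?_, hf1⟩
              cases hg : PySem.Dict.get? memo0 n with
              | none => rw [hg] at h; simp at h
              | some w => rw [hs _ _ hg]; rfl
            · right; exact h
          obtain ⟨c, m1, hc, hsub1⟩ := ih n memo₁ hs hcn
          obtain ⟨b2, m2, hrec, hsub2⟩ := ihk (if c.1 < best.1 then c else best) m1
            (fun k v h => hsub1 _ _ (hs _ _ h))
            (fun n' hn' => hn n' (List.mem_cons_of_mem _ hn'))
          exact ⟨b2, m2, by simp [dfsAKids, hc, hrec], fun k v h => hsub2 _ _ (hsub1 _ _ h)⟩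
      obtain ⟨bf, mf, hKL, hsubK⟩ := KL ns (q, node) memo' hsub (fun n hn => by
        rcases hkids n hn with h | ⟨h1, h2⟩
        · exact Or.inl h
        · exact Or.inr ⟨h1, by omega⟩)
      refine ⟨bf, mf.insert node bf, by simp [dfsA, hm, hq, hget, hKL], ?_⟩
      intro k v hk
      have h2 := hsubK k v hk
      have hkne : k ≠ node := by intro he; rw [he, hm] at hk; cases hk
      rw [PySem.Dict.get?_insert_of_ne _ _ hkne]
      exact h2

-- the stack machine simulates A's recursion step for step
theorem pvSim (RD : PySem.Dict Int (List Int)) (quiet : List Int) (K : Nat)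
    (hK : ∀ k ns, PySem.Dict.get? RD k = some ns → ns.length ≤ K) :
    ∀ (f : Nat) (node : Int) (memo' : PySem.Dict Int (Int × Int)) (p : Int × Int)
      (m'' : PySem.Dict Int (Int × Int)),
      dfsA RD quiet f node memo' = some (p, m'') →
      ∀ (rest : List (Int × Nat × Option (Int × Int))) (r : Option (Int × Int)),
        ∃ g, g ≤ (2 * K + 2) ^ f ∧
          runB RD quiet g ((node, 0, none) :: rest, memo', r) = (rest, m'', some p) := by
  intro f
  induction f with
  | zero => intro node memo' p m'' h; simp [dfsA] at h
  | succ f ih =>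
    intro node memo' p m'' h rest r
    have hP : 1 ≤ (2 * K + 2) ^ f := Nat.one_le_pow _ _ (by omega)
    cases hm : PySem.Dict.get? memo' node with
    | some v =>
      have he : dfsA RD quiet (f + 1) node memo' = some (v, memo') := by simp [dfsA, hm]
      rw [he] at h
      obtain ⟨hp, hmm⟩ : v = p ∧ memo' = m'' := by
        injection h with h'; injection h' with h1 h2; exact ⟨h1, h2⟩
      refine ⟨1, ?_, ?_⟩
      · calc (1 : Nat) ≤ (2 * K + 2) ^ f := hP
          _ ≤ (2 * K + 2) ^ (f + 1) := Nat.pow_le_pow_right (by omega) (by omega)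
      · subst hmm; subst hp
        rw [runB_cons_succ]
        simp [runB, stepB, hm]
    | none =>
      cases hq : PySem.List.pyGet? quiet node with
      | none => simp [dfsA, hm, hq] at h
      | some q =>
      cases hg : PySem.Dict.get? RD node with
      | none => simp [dfsA, hm, hq, hg] at h
      | some allKids =>
      cases hk : dfsAKids (dfsA RD quiet f) allKids (q, node) memo' with
      | none => simp [dfsA, hm, hq, hg, hk] at h
      | some bm =>
        obtain ⟨b2, m2⟩ := bm
        obtain ⟨hp, hmm⟩ : b2 = p ∧ m2.insert node b2 = m'' := by
          have he : dfsA RD quiet (f + 1) node memo' = some (b2, m2.insert node b2) := by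
            simp [dfsA, hm, hq, hg, hk]
          rw [he] at h
          injection h with h'; injection h' with h1 h2; exact ⟨h1, h2⟩
        have SIMK : ∀ (ks : List Int) (i : Nat) (best : Int × Int)
            (memo₁ : PySem.Dict Int (Int × Int)) (r' : Option (Int × Int))
            (b3 : Int × Int) (m3 : PySem.Dict Int (Int × Int)),
            allKids.drop i = ks →
            dfsAKids (dfsA RD quiet f) ks best memo₁ = some (b3, m3) →
            ∃ g, g ≤ ks.length * ((2 * K + 2) ^ f + 1) ∧
              runB RD quiet g (stepCont RD node i best rest memo₁ r') =
                (rest, m3.insert node b3, some b3) := by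
          intro ks
          induction ks with
          | nil =>
            intro i best memo₁ r' b3 m3 hdrop hkk
            have hlen : allKids.length ≤ i := by
              rcases Nat.lt_or_ge i allKids.length with h' | h'
              · rw [List.drop_eq_getElem_cons h'] at hdrop; cases hdrop
              · exact h'
            obtain ⟨hb3, hm3⟩ : best = b3 ∧ memo₁ = m3 := by
              injection hkk with h'; injection h' with h1 h2; exact ⟨h1, h2⟩
            refine ⟨0, Nat.zero_le _, ?_⟩
            have hnotlt : ¬ i < ((PySem.Dict.get? RD node).getD []).length := by
              rw [hg]; simp; omega
            subst hb3; subst hm3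
            have hsc : stepCont RD node i best rest memo₁ r' =
                (rest, memo₁.insert node best, some best) := by
              simp only [stepCont]
              rw [dif_neg hnotlt]
            rw [hsc]
            rfl
          | cons n ks' ihk =>
            intro i best memo₁ r' b3 m3 hdrop hkk
            have hi : i < allKids.length := by
              rcases Nat.lt_or_ge i allKids.length with h' | h'
              · exact h'
              · rw [List.drop_eq_nil_of_le h'] at hdrop; cases hdrop
            have hdc := List.drop_eq_getElem_cons hi
            rw [hdrop] at hdc
            obtain ⟨hn_eq, hks'⟩ : n = allKids[i] ∧ ks' = allKids.drop (i + 1) := by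
              injection hdc with h1 h2; exact ⟨h1, h2⟩
            cases hc : dfsA RD quiet f n memo₁ with
            | none =>
              rw [show dfsAKids (dfsA RD quiet f) (n :: ks') best memo₁ = none from by
                simp [dfsAKids, hc]] at hkk
              cases hkk
            | some cm =>
              obtain ⟨c, m1⟩ := cm
              have hkk' : dfsAKids (dfsA RD quiet f) ks' (if c.1 < best.1 then c else best) m1 =
                  some (b3, m3) := by
                rw [show dfsAKids (dfsA RD quiet f) (n :: ks') best memo₁ =
                  dfsAKids (dfsA RD quiet f) ks' (if c.1 < best.1 then c else best) m1 from by
                  simp [dfsAKids, hc]] at hkk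
                exact hkk
              obtain ⟨g1, hg1, hrun1⟩ := ih n memo₁ c m1 hc ((node, i + 1, some best) :: rest) r'
              obtain ⟨g2, hg2, hrun2⟩ := ihk (i + 1) (if c.1 < best.1 then c else best) m1 (some c)
                b3 m3 hks'.symm hkk'
              refine ⟨g1 + (1 + g2), ?_, ?_⟩
              · have hmul : (n :: ks').length * ((2 * K + 2) ^ f + 1) =
                    ks'.length * ((2 * K + 2) ^ f + 1) + ((2 * K + 2) ^ f + 1) := by
                  simp [List.length_cons, Nat.succ_mul]
                omega
              · have hstep0 : stepCont RD node i best rest memo₁ r' =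
                    ((n, 0, none) :: (node, i + 1, some best) :: rest, memo₁, r') := by
                  subst hn_eq
                  simp [stepCont, hg, hi]
                rw [hstep0, runB_add, hrun1, show (1 : Nat) + g2 = g2 + 1 from by omega,
                  runB_cons_succ]
                have hstep : stepB RD quiet ((node, i + 1, some best) :: rest, m1, some c) =
                    stepCont RD node (i + 1) (if c.1 < best.1 then c else best) rest m1 (some c) := by
                  simp [stepB]
                rw [hstep, hrun2]
        obtain ⟨g, hgb, hrun⟩ := SIMK allKids 0 (q, node) memo' r b2 m2 (by simp) hk
        refine ⟨1 + g, ?_, ?_⟩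
        · have h1 : allKids.length ≤ K := hK node allKids hg
          have h2 : allKids.length * ((2 * K + 2) ^ f + 1) ≤ K * ((2 * K + 2) ^ f + 1) :=
            Nat.mul_le_mul_right _ h1
          have h3 : K * ((2 * K + 2) ^ f + 1) = K * (2 * K + 2) ^ f + K := by ring
          have h4 : (2 * K + 2) ^ (f + 1) = 2 * (K * (2 * K + 2) ^ f) + 2 * (2 * K + 2) ^ f := by
            rw [pow_succ]; ring
          have h5 : K ≤ K * (2 * K + 2) ^ f := Nat.le_mul_of_pos_right _ (by omega)
          omega
        · rw [show (1 : Nat) + g = g + 1 from by omega, runB_cons_succ]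
          have hstep : stepB RD quiet ((node, 0, none) :: rest, memo', r) =
              stepCont RD node 0 (q, node) rest memo' r := by
            simp [stepB, hm, hq]
          rw [hstep, hrun, ← hmm, hp]

-- ===== VERDICT (by name: the statement is the Claim_ definition above) =====
theorem DFS_spec : Claim_equal_DFS := by
  unfold Claim_equal_DFS
  intro richer node quiet memo _ hpre
  unfold Spec_DFS
  unfold Pre_DFS pvPreB at hpre
  rw [Bool.or_eq_true] at hpre
  have HMAIN : ∃ p m'', dfsA (PySem.Dict.mk richer) quiet (richer.length + 2) node
      (PySem.Dict.mk memo) = some (p, m'') := by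
    rcases hpre with h | h
    · obtain ⟨p, m'', he, _⟩ := pvMain (PySem.Dict.mk richer) quiet [] (fun _ => 0)
        (PySem.Dict.mk memo) (fun k hk => absurd hk (List.not_mem_nil))
        (richer.length + 2) node (PySem.Dict.mk memo) (fun _ _ hh => hh)
        (Or.inl ⟨h, by omega⟩)
      exact ⟨p, m'', he⟩
    · rw [List.all_eq_true] at h
      have HS : ∀ k, k ∈ pvReach richer memo node →
          PySem.Dict.get? (PySem.Dict.mk memo) k = none →
          (PySem.List.pyGet? quiet k).isSome = true ∧
          ∃ ns, PySem.Dict.get? (PySem.Dict.mk richer) k = some ns ∧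
            1 ≤ pvRank richer memo k ∧
            ∀ n ∈ ns, (PySem.Dict.get? (PySem.Dict.mk memo) n).isSome = true ∨
              (n ∈ pvReach richer memo node ∧ pvRank richer memo n < pvRank richer memo k) := by
        intro k hk hnone
        have h1 := h k hk
        rw [Bool.or_eq_true] at h1
        rcases h1 with h1 | h1
        · unfold pvMemoHas at h1; rw [hnone] at h1; simp at h1
        · rw [Bool.and_eq_true, Bool.and_eq_true] at h1
          obtain ⟨⟨hin, hkey⟩, hall⟩ := h1
          refine ⟨pvPyGet?_isSome_of_inRange _ _ (of_decide_eq_true hin), ?_⟩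
          obtain ⟨ns, hns⟩ : ∃ ns, PySem.Dict.get? (PySem.Dict.mk richer) k = some ns := by
            unfold pvHasKey at hkey
            cases hgg : PySem.Dict.get? (PySem.Dict.mk richer) k
            · rw [hgg] at hkey; simp at hkey
            · exact ⟨_, rfl⟩
          refine ⟨ns, hns, pvRank_pos _ _ _ hkey, ?_⟩
          intro n hn
          rw [List.all_eq_true] at hall
          have h2 := hall n (by unfold pvKids; rw [hns]; simpa using hn)
          rw [Bool.or_eq_true] at h2
          rcases h2 with h2 | h2
          · left; unfold pvMemoHas at h2; exact h2
          · right
            rw [Bool.and_eq_true] at h2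
            obtain ⟨hc, hr⟩ := h2
            exact ⟨by simpa using hc, of_decide_eq_true hr⟩
      obtain ⟨p, m'', he, _⟩ := pvMain (PySem.Dict.mk richer) quiet (pvReach richer memo node)
        (pvRank richer memo) (PySem.Dict.mk memo) HS (richer.length + 2) node
        (PySem.Dict.mk memo) (fun _ _ hh => hh)
        (Or.inr ⟨pvMem_reach richer memo node, by have := pvRank_le richer memo node; omega⟩)
      exact ⟨p, m'', he⟩
  obtain ⟨p, m'', he⟩ := HMAIN
  obtain ⟨g, hg, hrun⟩ := pvSim (PySem.Dict.mk richer) quiet (pvMaxKids richer)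
    (fun k ns hh => pvKids_le_max richer k ns hh) (richer.length + 2) node (PySem.Dict.mk memo)
    p m'' he [] none
  have hA : DFS richer node quiet memo = p := by unfold DFS; rw [he]
  have hB : DFS_alt richer node quiet memo = p := by
    unfold DFS_alt
    have hfull : runB (PySem.Dict.mk richer) quiet
        ((2 * pvMaxKids richer + 2) ^ (richer.length + 2))
        ([(node, 0, none)], PySem.Dict.mk memo, none) = ([], m'', some p) := by
      rw [show (2 * pvMaxKids richer + 2) ^ (richer.length + 2) =
        g + ((2 * pvMaxKids richer + 2) ^ (richer.length + 2) - g) from by omega]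
      rw [runB_add, hrun, runB_nil]
    simp only [hfull]
    rfl
  rw [hA, hB]
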